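-- pv_equiv track=rewrite | github.com/L-SHawn91/shawn-bio-search | scripts/gather_papers.py | _best_author_label
-- ===== SOURCE A (Python) =====
-- from typing import Any, Dict, List, Optional
--
-- def _best_author_label(labels: List[str]) -> str:
--     if not labels:
--         return ""
--     labels = [x.strip() for x in labels if x and x.strip()]
--     if not labels:
--         return ""
--     labels.sort(key=lambda s: (
--         any(len(tok) > 1 for tok in s.replace('.', ' ').split()),
--         len(s),
--     ), reverse=True)
--     return labels[0]
-- ===== SOURCE B (Python) =====
-- def _best_author_label(labels):
--     best = None
--     best_key = None
--     for x in labels: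
--         if not x:
--             continue
--         s = x.strip()
--         if not s:
--             continue
--         k = (any(len(t) > 1 for t in s.replace('.', ' ').split()), len(s))
--         if best is None or k > best_key:
--             best, best_key = s, k
--     return best if best is not None else ""
-- ===== Notes on version B (the rewrite author's own statement) =====
-- stated objective: simpler
-- what changed: Replaces the staged filter-comprehension + stable reverse sort + index-0 with one explicit left-to-right loop over the raw input that strips and skips inline and maintains only the running best label and its compound key; no intermediate list is built and no sort is performed.
import Mathlib
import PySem

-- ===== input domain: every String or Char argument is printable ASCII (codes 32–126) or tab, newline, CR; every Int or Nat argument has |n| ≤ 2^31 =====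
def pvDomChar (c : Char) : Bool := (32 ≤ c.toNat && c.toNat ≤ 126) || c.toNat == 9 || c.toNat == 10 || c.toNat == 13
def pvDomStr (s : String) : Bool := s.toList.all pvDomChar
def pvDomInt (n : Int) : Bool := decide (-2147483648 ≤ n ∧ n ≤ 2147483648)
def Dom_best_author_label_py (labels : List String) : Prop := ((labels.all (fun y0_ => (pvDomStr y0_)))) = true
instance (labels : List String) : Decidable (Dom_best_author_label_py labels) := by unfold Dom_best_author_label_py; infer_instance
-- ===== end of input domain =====

-- B replaces A's filter-comprehension + stable reverse sort + take-first by one explicit pass over the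
-- raw input that strips/skips inline and keeps only the running best label and key (simpler: no
-- intermediate list, no sort).

-- the compound key shared by both Pythons: (any token longer than 1 after '.'→' ', len(s))
def pvKey1 (s : String) : Bool :=
  (PySem.Str.split₀ (PySem.Str.replace s "." " ")).any (fun tok => decide ((1 : Int) < PySem.Str.len tok))
def pvKey2 (s : String) : Int := PySem.Str.len s

-- ===== PORT A =====
def best_author_label_py (labels : List String) : String :=
  if labels = [] then ""
  else
    let ls := (labels.filter (fun x => !(x == "") && !(PySem.Str.strip x == ""))).map PySem.Str.strip
    if ls = [] then ""
    else ((PySem.List.sorted2 ls pvKey1 pvKey2 true).head?).getD ""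

-- ===== PORT B =====
-- the loop body of Source B: skip falsy/blank entries, otherwise compare the tuple key with the running best
def pvBStep (best : Option (String × (Bool × Int))) (x : String) : Option (String × (Bool × Int)) :=
  if x == "" then best
  else
    let s := PySem.Str.strip x
    if s == "" then best
    else
      let k : Bool × Int := (pvKey1 s, pvKey2 s)
      match best with
      | none => some (s, k)
      | some (b, bk) =>
          -- Python tuple '>' on (bool, int): k > bk
          if (decide (bk.1 < k.1) || (bk.1 == k.1 && decide (bk.2 < k.2))) then some (s, k)
          else some (b, bk)

def best_author_label_py_alt (labels : List String) : String :=
  match labels.foldl pvBStep none with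
  | some (b, _) => b
  | none => ""

-- ===== PRECONDITION & SPEC =====
def Spec_best_author_label_py (labels : List String) (out : String) : Prop := out = best_author_label_py_alt labels
instance (labels : List String) (out : String) : Decidable (Spec_best_author_label_py labels out) := by unfold Spec_best_author_label_py; infer_instance

-- ===== CLAIM (what is proved, stated in full; the proofs are below) =====
def Claim_equal_best_author_label_py : Prop := ∀ (labels : List String), Dom_best_author_label_py labels → Spec_best_author_label_py labels (best_author_label_py labels)

-- ===== LEMMAS AND PROOFS =====

-- the running-best step over the filtered, stripped list
def pvMaxStep (acc : Option String) (x : String) : Option String :=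
  match acc with
  | none => some x
  | some m =>
      if (decide (pvKey1 m < pvKey1 x) || !decide (pvKey1 x < pvKey1 m) && decide (pvKey2 m < pvKey2 x))
      then some x else some m

def pvEnrich (s : String) : String × (Bool × Int) := (s, (pvKey1 s, pvKey2 s))

-- Python's tuple '>' on a (bool, int) key agrees with the strict comparator used by the sort lemmas
theorem pv_cond (a b : Bool) (p : Prop) [Decidable p] :
    (decide (a < b) || (a == b && decide p)) = (decide (a < b) || !decide (b < a) && decide p) := by
  cases a <;> cases b <;> simp

theorem pv_head_insertBy {α : Type} (before : α → α → Bool) (x : α) (acc : List α) :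
    (PySem.List.insertBy before x acc).head? =
      some (match acc with | [] => x | m :: _ => if before x m then x else m) := by
  cases acc with
  | nil => simp [PySem.List.insertBy]
  | cons m t =>
    simp only [PySem.List.insertBy]
    split
    · simp_all
    · simp_all

-- the head of A's insertion-sort accumulator evolves exactly like the running best
theorem pv_head_foldl :
    ∀ (xs : List String) (acc : List String),
      (xs.foldl (fun acc x =>
          PySem.List.insertBy
            (fun a b => decide (pvKey1 b < pvKey1 a) || !decide (pvKey1 a < pvKey1 b) && decide (pvKey2 b < pvKey2 a)) x acc) acc).head? =
      xs.foldl pvMaxStep acc.head? := by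
  intro xs
  induction xs with
  | nil => intro acc; simp
  | cons x t ih =>
    intro acc
    simp only [List.foldl_cons]
    rw [ih]
    congr 1
    rw [show (PySem.List.insertBy
        (fun a b => decide (pvKey1 b < pvKey1 a) || !decide (pvKey1 a < pvKey1 b) && decide (pvKey2 b < pvKey2 a)) x acc).head?
      = _ from pv_head_insertBy _ x acc]
    cases acc <;> simp [pvMaxStep] <;> split <;> simp

-- B's single skipping pass over the raw list is the running-best fold over A's filtered, stripped list
theorem pv_bfold :
    ∀ (labels : List String) (acc : Option String),
      labels.foldl pvBStep (acc.map pvEnrich)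
        = (((labels.filter (fun x => !(x == "") && !(PySem.Str.strip x == ""))).map PySem.Str.strip).foldl
            pvMaxStep acc).map pvEnrich := by
  intro labels
  induction labels with
  | nil => intro acc; simp
  | cons x t ih =>
    intro acc
    by_cases hx : x = ""
    · subst hx
      simpa [pvBStep] using ih acc
    · by_cases hs : PySem.Str.strip x = ""
      · have h1 : pvBStep (acc.map pvEnrich) x = acc.map pvEnrich := by
          simp [pvBStep, hx, hs]
        simp only [List.foldl_cons, h1]
        simp [hs, ih acc]
      · have hstep : pvBStep (acc.map pvEnrich) x = (pvMaxStep acc (PySem.Str.strip x)).map pvEnrich := by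
          cases acc with
          | none => simp [pvBStep, pvMaxStep, pvEnrich, hx, hs]
          | some m =>
            simp only [pvBStep, pvMaxStep, pvEnrich, pv_cond, Option.map_some]
            simp [hx, hs]
            split <;> simp [pvEnrich]
        simp only [List.foldl_cons, hstep]
        simp only [List.filter_cons]
        have hcond : (!(x == "") && !(PySem.Str.strip x == "")) = true := by
          simp [hx, hs]
        rw [hcond]
        simp only [if_true, List.map_cons, List.foldl_cons]
        exact ih (pvMaxStep acc (PySem.Str.strip x))

theorem pv_maxfold_some : ∀ (xs : List String) (m : String), ∃ r, xs.foldl pvMaxStep (some m) = some r := by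
  intro xs
  induction xs with
  | nil => intro m; exact ⟨m, rfl⟩
  | cons x t ih =>
    intro m
    simp only [List.foldl_cons, pvMaxStep]
    split
    · exact ih x
    · exact ih m

theorem pv_maxfold_ne_nil (xs : List String) (h : ¬ xs = []) :
    ∃ m, xs.foldl pvMaxStep none = some m := by
  cases xs with
  | nil => exact absurd rfl h
  | cons y ys =>
    simpa [pvMaxStep] using pv_maxfold_some ys y

-- ===== VERDICT (by name: the statement is the Claim_ definition above) =====
theorem best_author_label_py_spec : Claim_equal_best_author_label_py := by
  unfold Claim_equal_best_author_label_py
  intro labels _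
  unfold Spec_best_author_label_py best_author_label_py best_author_label_py_alt
  have hB := pv_bfold labels none
  simp only [Option.map_none] at hB
  rw [hB]
  dsimp only
  split
  · rename_i h; subst h; rfl
  · split
    · rename_i hls
      rw [hls]
      rfl
    · rename_i hls
      obtain ⟨m, hm⟩ := pv_maxfold_ne_nil _ hls
      simp only [PySem.List.sorted2, if_true]
      rw [pv_head_foldl _ []]
      simp only [List.head?_nil]
      rw [hm]
      simp [pvEnrich]
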